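-- pv_equiv track=rewrite | github.com/limitDM/codility | 10_prime_and_composite_numbers/flags.py | peak_gaps
-- ===== SOURCE A (Python) =====
-- def peak_gaps(a):
--   ret = []
--   cnt = 0
--   for i in range(1, len(a) - 1):
--     cnt += 1;
--     if a[i] > a[i - 1] and a[i] > a[i + 1]:
--       ret += [cnt]
--       cnt = 0
--   return ret
-- ===== SOURCE B (Python) =====
-- def peak_gaps(a):
--   peaks = [i + 1 for i, (x, y, z) in enumerate(zip(a, a[1:], a[2:]))
--            if y > x and y > z]
--   return [p - q for p, q in zip(peaks, [0] + peaks)]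
-- ===== Notes on version B (the rewrite author's own statement) =====
-- stated objective: alternative
-- what changed: B drops A's fused index loop with a running since-last-peak counter: it detects peaks by zipping the list with its two shifts (enumerate over triples), then turns the materialised peak-index list into gaps by zipping it with its 0-prefixed self and taking pairwise differences.
import Mathlib
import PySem

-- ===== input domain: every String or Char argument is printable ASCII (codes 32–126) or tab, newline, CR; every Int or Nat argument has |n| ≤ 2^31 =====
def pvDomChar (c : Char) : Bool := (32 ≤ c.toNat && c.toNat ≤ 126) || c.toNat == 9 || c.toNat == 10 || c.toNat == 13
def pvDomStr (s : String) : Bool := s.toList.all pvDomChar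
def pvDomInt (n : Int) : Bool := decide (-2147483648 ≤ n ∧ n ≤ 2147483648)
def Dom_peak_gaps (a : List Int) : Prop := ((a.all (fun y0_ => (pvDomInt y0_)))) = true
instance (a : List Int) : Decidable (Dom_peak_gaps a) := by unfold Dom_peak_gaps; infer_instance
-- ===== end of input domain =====

-- B replaces A's fused index loop (running since-last-peak counter) by a zip of the list
-- with its two shifts to find peak positions, then a pairwise-difference zip; same O(n)
-- cost; objective: alternative decomposition.

-- ===== PORT A =====
-- a[i] ported as pyGetD …: every index the loop touches is in range, where pyGetD = Python indexing.
def peak_gaps (a : List Int) : List Int :=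
  (((PySem.List.pyRange 1 ((a.length : Int) - 1) 1).foldl
    (fun (st : List Int × Int) i =>
      let cnt := st.2 + 1
      if PySem.List.pyGetD a i 0 > PySem.List.pyGetD a (i - 1) 0 ∧
         PySem.List.pyGetD a i 0 > PySem.List.pyGetD a (i + 1) 0 then
        (st.1 ++ [cnt], 0)
      else
        (st.1, cnt))
    ([], 0))).1

-- ===== PORT B =====
-- zip(a, a[1:], a[2:]) ported as nested pairs; enumerate is PySem.List.enumerate.
def peak_gaps_alt (a : List Int) : List Int :=
  let peaks := (PySem.List.enumerate ((a.zip (a.drop 1)).zip (a.drop 2)) 0).filterMap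
    (fun p => if p.2.1.2 > p.2.1.1 ∧ p.2.1.2 > p.2.2 then some (p.1 + 1) else none)
  (peaks.zip (0 :: peaks)).map (fun pq => pq.1 - pq.2)

-- ===== PRECONDITION & SPEC =====
def Spec_peak_gaps (a : List Int) (out : List Int) : Prop := out = peak_gaps_alt a
instance (a : List Int) (out : List Int) : Decidable (Spec_peak_gaps a out) := by unfold Spec_peak_gaps; infer_instance

-- ===== CLAIM (what is proved, stated in full; the proofs are below) =====
def Claim_equal_peak_gaps : Prop := ∀ (a : List Int), Dom_peak_gaps a → Spec_peak_gaps a (peak_gaps a)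

-- ===== LEMMAS AND PROOFS =====

-- A's counter after reaching index s is s - 1 - (last peak index, 0 initially): the fused
-- fold equals a pairwise-difference fold over the filtered index list.
theorem pv_fold_equiv (P : Int → Bool) (e : Int) : ∀ (n : Nat) (s : Int) (ret : List Int) (prev : Int),
    e - s = n → s ≤ e →
    (PySem.List.pyRange s e 1).foldl
      (fun (st : List Int × Int) i =>
        let cnt := st.2 + 1
        if P i then (st.1 ++ [cnt], 0) else (st.1, cnt))
      (ret, s - 1 - prev)
    =
    (let b := ((PySem.List.pyRange s e 1).filter P).foldl
        (fun (st : List Int × Int) p => (st.1 ++ [p - st.2], p)) (ret, prev)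
     (b.1, e - 1 - b.2)) := by
  intro n
  induction n with
  | zero =>
    intro s ret prev h hle
    have hse : e = s := by omega
    simp [PySem.List.pyRange_one_eq_nil (by omega : e ≤ s)]
    omega
  | succ k ih =>
    intro s ret prev h hle
    have hlt : s < e := by omega
    rw [PySem.List.pyRange_one_cons hlt]
    by_cases hp : P s = true
    · simp only [List.foldl_cons, List.filter_cons, hp]
      have := ih (s + 1) (ret ++ [s - 1 - prev + 1]) s (by omega) (by omega)
      simp only [show s + 1 - 1 - s = 0 by ring] at this
      have harg : s - 1 - prev + 1 = s - prev := by ring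
      rw [harg] at this ⊢
      exact this
    · simp only [List.foldl_cons, List.filter_cons, if_neg hp]
      have := ih (s + 1) ret prev (by omega) (by omega)
      have harg : s - 1 - prev + 1 = s + 1 - 1 - prev := by ring
      rw [harg]
      exact this

-- the pairwise-difference fold is the zip-with-shift map
theorem pv_fold_diff (L : List Int) : ∀ (ret : List Int) (prev : Int),
    ((L.foldl (fun (st : List Int × Int) p => (st.1 ++ [p - st.2], p)) (ret, prev))).1
      = ret ++ ((L.zip (prev :: L)).map (fun pq => pq.1 - pq.2)) := by
  induction L with
  | nil => intro ret prev; simp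
  | cons p L ih =>
    intro ret prev
    simp only [List.foldl_cons, List.zip_cons_cons, List.map_cons, ih]
    simp

-- B's peak list is the filtered index range
theorem pv_filterMap_if {α β : Type} (l : List α) (p : α → Prop) [DecidablePred p] (f : α → β) :
    l.filterMap (fun x => if p x then some (f x) else none) = (l.filter (fun x => decide (p x))).map f := by
  induction l with
  | nil => rfl
  | cons x l ih => by_cases h : p x <;> simp [h, ih]

theorem pv_filter_map {α β : Type} (l : List α) (f : α → β) (p : β → Bool) :
    (l.map f).filter p = (l.filter (fun x => p (f x))).map f := by
  rw [← List.filterMap_eq_map, List.filter_filterMap, List.filterMap_filter]; rfl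

theorem pv_peaks_eq (a : List Int) :
    (PySem.List.enumerate ((a.zip (a.drop 1)).zip (a.drop 2)) 0).filterMap
      (fun p => if p.2.1.2 > p.2.1.1 ∧ p.2.1.2 > p.2.2 then some (p.1 + 1) else none)
    = (PySem.List.pyRange 1 ((a.length : Int) - 1) 1).filter
        (fun i => decide (PySem.List.pyGetD a i 0 > PySem.List.pyGetD a (i - 1) 0 ∧
                          PySem.List.pyGetD a i 0 > PySem.List.pyGetD a (i + 1) 0)) := by
  by_cases hla : a.length < 2
  · have h1 : (a.zip (a.drop 1)).zip (a.drop 2) = [] := by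
      have : a.drop 2 = [] := by rw [List.drop_eq_nil_iff]; omega
      simp [this]
    rw [h1, PySem.List.pyRange_one_eq_nil (by omega : (a.length : Int) - 1 ≤ 1)]
    rfl
  · rw [not_lt] at hla
    set T := (a.zip (a.drop 1)).zip (a.drop 2) with hT
    set N : Nat := a.length - 2 with hN
    have hlen : T.length = N := by simp [hT, hN]; omega
    rw [PySem.List.enumerate_eq_map_pyRange T (((0:Int),(0:Int)),(0:Int)),
        List.filterMap_map,
        show PySem.List.len T = (N : Int) by simp [PySem.List.len_eq, hlen],
        PySem.List.pyRange_zero_natCast,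
        List.filterMap_map,
        PySem.List.pyRange_one,
        show ((a.length : Int) - 1 - 1).toNat = N by omega]
    simp only [Function.comp_def]
    rw [pv_filterMap_if (List.range N)
        (fun k : Nat => (PySem.List.pyGetD T (k : Int) (((0:Int),(0:Int)),(0:Int))).1.2 >
                        (PySem.List.pyGetD T (k : Int) (((0:Int),(0:Int)),(0:Int))).1.1 ∧
                        (PySem.List.pyGetD T (k : Int) (((0:Int),(0:Int)),(0:Int))).1.2 >
                        (PySem.List.pyGetD T (k : Int) (((0:Int),(0:Int)),(0:Int))).2)
        (fun k : Nat => ((k : Int) + 1)),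
        pv_filter_map]
    have hget : ∀ k, k < N → PySem.List.pyGetD T (k : Int) (((0:Int),(0:Int)),(0:Int))
        = ((a.getD k 0, a.getD (k+1) 0), a.getD (k+2) 0) := by
      intro k hk
      rw [PySem.List.pyGetD_natCast]
      have hk' : k < T.length := by omega
      rw [List.getD_eq_getElem _ _ hk']
      have h2 : k < a.length := by omega
      have h3 : k + 1 < a.length := by omega
      have h4 : k + 2 < a.length := by omega
      simp [hT, List.getElem_zip, List.getElem_drop, h2, h3, h4]
      simp [Nat.add_comm]
    have hcond : ∀ k ∈ List.range N,
        (decide ((PySem.List.pyGetD T (k : Int) (((0:Int),(0:Int)),(0:Int))).1.2 >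
                 (PySem.List.pyGetD T (k : Int) (((0:Int),(0:Int)),(0:Int))).1.1 ∧
                 (PySem.List.pyGetD T (k : Int) (((0:Int),(0:Int)),(0:Int))).1.2 >
                 (PySem.List.pyGetD T (k : Int) (((0:Int),(0:Int)),(0:Int))).2))
        = (decide (PySem.List.pyGetD a (1 + (k:Int)) 0 > PySem.List.pyGetD a (1 + (k:Int) - 1) 0 ∧
                   PySem.List.pyGetD a (1 + (k:Int)) 0 > PySem.List.pyGetD a (1 + (k:Int) + 1) 0)) := by
      intro k hk
      simp only [List.mem_range] at hk
      rw [hget k hk,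
          show (1 : Int) + (k : Nat) = ((k+1 : Nat) : Int) from by push_cast; ring,
          show ((k+1 : Nat) : Int) - 1 = ((k : Nat) : Int) from by push_cast; ring,
          show ((k+1 : Nat) : Int) + 1 = ((k+2 : Nat) : Int) from by push_cast; ring,
          PySem.List.pyGetD_natCast, PySem.List.pyGetD_natCast, PySem.List.pyGetD_natCast]
    rw [List.filter_congr hcond]
    exact List.map_congr_left (fun k _ => by ring)

-- ===== VERDICT (by name: the statement is the Claim_ definition above) =====
theorem peak_gaps_spec : Claim_equal_peak_gaps := by
  intro a _
  unfold Spec_peak_gaps peak_gaps peak_gaps_alt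
  rw [pv_peaks_eq]
  set e : Int := (a.length : Int) - 1 with he
  by_cases hle : 1 ≤ e
  · have := pv_fold_equiv
      (fun i => decide (PySem.List.pyGetD a i 0 > PySem.List.pyGetD a (i - 1) 0 ∧
                        PySem.List.pyGetD a i 0 > PySem.List.pyGetD a (i + 1) 0))
      e (e - 1).toNat 1 [] 0 (by omega) hle
    simp only [show (1 : Int) - 1 - 0 = 0 by ring] at this
    simp only [decide_eq_true_eq] at this ⊢
    rw [this, pv_fold_diff]
    simp
  · rw [PySem.List.pyRange_one_eq_nil (by omega : e ≤ 1)]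
    simp
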